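-- pv_equiv track=rewrite | github.com/renjieliu/leetcode | 1772.py | sortFeatures
-- ===== SOURCE A (Python) =====
-- def sortFeatures(features: 'List[str]', responses: 'List[str]') -> 'List[str]':
--     feature_order = {}
--     for i, f in enumerate(features):
--         feature_order[f] = i
--     hmp = {}
--     for f in set(features):
--         hmp[f] = 0
--     for r in responses:
--         for c in set(r.split(' ')): #this will remove the dups
--             if c in hmp:
--                 hmp[c]+=1
--     hmp_cnt = {} #group the items with same occurrence
--     for k, v in hmp.items():
--         if v not in hmp_cnt:
--             hmp_cnt[v] = []
--         hmp_cnt[v].append(k)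
--     output = []
--     for k in sorted(hmp_cnt.keys(), reverse = True):
--         output += sorted(hmp_cnt[k], key = lambda x: feature_order[x] )
--     return output
-- ===== SOURCE B (Python) =====
-- def sortFeatures(features: 'List[str]', responses: 'List[str]') -> 'List[str]':
--     order = {f: i for i, f in enumerate(features)}
--     cnt = {}
--     for r in responses:
--         for w in set(r.split(' ')):
--             cnt[w] = cnt.get(w, 0) + 1
--     return sorted(order, key=lambda f: (-cnt.get(f, 0), order[f]))
-- ===== Notes on version B (the rewrite author's own statement) =====
-- stated objective: simpler
-- what changed: B drops A's count-bucket dict, the descending loop over sorted count keys and the per-bucket sorts, and instead emits the distinct features with a single sort under the composite key (-count, first-seen order); counts are gathered over all response words with dict.get instead of pre-seeding a feature dict and guarding membership.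
import Mathlib
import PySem

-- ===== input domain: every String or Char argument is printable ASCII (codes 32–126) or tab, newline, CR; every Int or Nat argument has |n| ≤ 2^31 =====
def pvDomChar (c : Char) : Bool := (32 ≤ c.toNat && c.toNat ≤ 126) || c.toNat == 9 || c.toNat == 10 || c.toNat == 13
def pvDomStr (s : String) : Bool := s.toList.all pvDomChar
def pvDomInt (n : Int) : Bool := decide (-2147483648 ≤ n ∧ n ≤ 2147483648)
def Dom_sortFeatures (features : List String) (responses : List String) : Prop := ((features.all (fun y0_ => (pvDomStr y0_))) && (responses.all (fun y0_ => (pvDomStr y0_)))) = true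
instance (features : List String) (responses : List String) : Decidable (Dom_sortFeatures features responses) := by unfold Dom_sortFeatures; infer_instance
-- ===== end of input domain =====

-- B replaces A's count-bucket dict, descending-count loop and per-bucket sorts by one
-- composite-key sort of the distinct features (objective: simpler).

-- ===== PORT A =====
def sortFeatures (features : List String) (responses : List String) : List String :=
  let feature_order : PySem.Dict String Int :=
    (PySem.List.enumerate features).foldl (fun d p => d.insert p.2 p.1) PySem.Dict.empty
  let hmp0 : PySem.Dict String Int :=
    (PySem.Set.ofList features).foldl (fun d f => d.insert f 0) PySem.Dict.empty
  let hmp : PySem.Dict String Int :=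
    responses.foldl (fun d r =>
      (PySem.Set.ofList ((PySem.Str.split? r " ").getD [])).foldl
        (fun d c => if d.contains c then d.insert c (d.getD c 0 + 1) else d) d) hmp0
  let hmp_cnt : PySem.Dict Int (List String) :=
    hmp.items.foldl (fun d p =>
      (if d.contains p.2 then d else d.insert p.2 []).modify p.2 [] (fun l => l ++ [p.1]))
      PySem.Dict.empty
  (PySem.List.sorted hmp_cnt.keys (fun k => k) true).foldl
    (fun out k => out ++ PySem.List.sorted (hmp_cnt.getD k []) (fun x => feature_order.getD x 0)) []

-- ===== PORT B =====
def sortFeatures_alt (features : List String) (responses : List String) : List String :=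
  let order : PySem.Dict String Int :=
    (PySem.List.enumerate features).foldl (fun d p => d.insert p.2 p.1) PySem.Dict.empty
  let cnt : PySem.Dict String Int :=
    responses.foldl (fun d r =>
      (PySem.Set.ofList ((PySem.Str.split? r " ").getD [])).foldl
        (fun d w => d.insert w (d.getD w 0 + 1)) d) PySem.Dict.empty
  PySem.List.sorted2 order.keys (fun f => -(cnt.getD f 0)) (fun f => order.getD f 0)

-- ===== PRECONDITION & SPEC =====
def Spec_sortFeatures (features : List String) (responses : List String) (out : List String) : Prop := out = sortFeatures_alt features responses
instance (features : List String) (responses : List String) (out : List String) : Decidable (Spec_sortFeatures features responses out) := by unfold Spec_sortFeatures; infer_instance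

-- ===== CLAIM (what is proved, stated in full; the proofs are below) =====
def Claim_equal_sortFeatures : Prop := ∀ (features : List String) (responses : List String), Dom_sortFeatures features responses → Spec_sortFeatures features responses (sortFeatures features responses)

-- ===== LEMMAS AND PROOFS =====

-- the word set of one response, and the dicts both programs build
def pvW (r : String) : List String := PySem.Set.ofList ((PySem.Str.split? r " ").getD [])

def pvOrd (features : List String) : PySem.Dict String Int :=
  (PySem.List.enumerate features).foldl (fun d p => d.insert p.2 p.1) PySem.Dict.empty

def pvCnt (responses : List String) : PySem.Dict String Int :=
  responses.foldl (fun d r =>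
    (pvW r).foldl (fun d w => d.insert w (d.getD w 0 + 1)) d) PySem.Dict.empty

def pvHmp0 (features : List String) : PySem.Dict String Int :=
  (PySem.Set.ofList features).foldl (fun d f => d.insert f 0) PySem.Dict.empty

def pvHmp (features responses : List String) : PySem.Dict String Int :=
  responses.foldl (fun d r =>
    (pvW r).foldl (fun d c => if d.contains c then d.insert c (d.getD c 0 + 1) else d) d)
    (pvHmp0 features)

def pvHmpCnt (features responses : List String) : PySem.Dict Int (List String) :=
  (pvHmp features responses).items.foldl (fun d p =>
    (if d.contains p.2 then d else d.insert p.2 []).modify p.2 [] (fun l => l ++ [p.1]))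
    PySem.Dict.empty

def pvSum (responses : List String) (f : String) : Int :=
  (responses.map (fun r => ((pvW r).count f : Int))).sum

theorem sortFeatures_eq_helpers (features responses : List String) :
    sortFeatures features responses =
      (PySem.List.sorted (pvHmpCnt features responses).keys (fun k => k) true).foldl
        (fun out k => out ++
          PySem.List.sorted ((pvHmpCnt features responses).getD k [])
            (fun x => (pvOrd features).getD x 0)) [] := rfl

theorem sortFeatures_alt_eq_helpers (features responses : List String) :
    sortFeatures_alt features responses =
      PySem.List.sorted2 (pvOrd features).keys
        (fun f => -((pvCnt responses).getD f 0)) (fun f => (pvOrd features).getD f 0) := rfl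

-- keys of the order dict are the distinct features, first occurrences in order
theorem pvOrd_keys (features : List String) :
    (pvOrd features).keys = PySem.Set.ofList features := by
  unfold pvOrd
  rw [PySem.Dict.keys_foldl_insert_key (PySem.List.enumerate features) (fun p => p.2)
    (fun d p => p.1) PySem.Dict.empty]
  rw [PySem.List.map_snd_enumerate]
  rfl

-- the order-fold stores injective, strictly-bounded indices
theorem pvOrdFold_inj (xs : List String) : ∀ (n : Int) (d : PySem.Dict String Int),
    (∀ k i, d.get? k = some i → i < n) →
    (∀ k k' i, d.get? k = some i → d.get? k' = some i → k = k') →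
    (∀ k i, ((PySem.List.enumerate xs n).foldl (fun d p => d.insert p.2 p.1) d).get? k = some i →
        i < n + xs.length) ∧
    (∀ k k' i, ((PySem.List.enumerate xs n).foldl (fun d p => d.insert p.2 p.1) d).get? k = some i →
        ((PySem.List.enumerate xs n).foldl (fun d p => d.insert p.2 p.1) d).get? k' = some i →
        k = k') := by
  induction xs with
  | nil => intro n d hb hi; exact ⟨fun k i h => by simpa using hb k i h, hi⟩
  | cons x xs ih =>
    intro n d hb hi
    rw [PySem.List.enumerate_cons, List.foldl_cons]
    have hb' : ∀ k i, (d.insert x n).get? k = some i → i < n + 1 := by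
      intro k i h
      rw [PySem.Dict.get?_insert] at h
      split at h
      · cases h; omega
      · exact lt_trans (hb k i h) (by omega)
    have hi' : ∀ k k' i, (d.insert x n).get? k = some i → (d.insert x n).get? k' = some i → k = k' := by
      intro k k' i h1 h2
      rw [PySem.Dict.get?_insert] at h1 h2
      split at h1 <;> split at h2
      · subst_vars; rfl
      · injection h1 with h1; exact absurd (hb k' i h2) (by omega)
      · injection h2 with h2; exact absurd (hb k i h1) (by omega)
      · exact hi k k' i h1 h2
    obtain ⟨hb2, hi2⟩ := ih (n + 1) (d.insert x n) hb' hi'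
    refine ⟨fun k i h => ?_, hi2⟩
    have := hb2 k i h
    simp only [List.length_cons]
    push_cast at this ⊢
    omega

theorem pvOrd_getD_inj (features : List String) {f g : String}
    (hf : f ∈ (pvOrd features).keys) (hg : g ∈ (pvOrd features).keys)
    (h : (pvOrd features).getD f 0 = (pvOrd features).getD g 0) : f = g := by
  obtain ⟨hb, hi⟩ := pvOrdFold_inj features 0 PySem.Dict.empty
    (by simp [PySem.Dict.get?_empty])
    (by simp [PySem.Dict.get?_empty])
  have hf' : (pvOrd features).get? f ≠ none := by
    intro hnone; rw [PySem.Dict.get?_eq_none_iff_not_mem_keys] at hnone; exact hnone (by exact hf)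
  have hg' : (pvOrd features).get? g ≠ none := by
    intro hnone; rw [PySem.Dict.get?_eq_none_iff_not_mem_keys] at hnone; exact hnone (by exact hg)
  obtain ⟨a, ha⟩ := Option.ne_none_iff_exists'.mp hf'
  obtain ⟨b, hbb⟩ := Option.ne_none_iff_exists'.mp hg'
  have hda : (pvOrd features).getD f 0 = a := PySem.Dict.getD_of_get?_eq_some _ 0 ha
  have hdb : (pvOrd features).getD g 0 = b := PySem.Dict.getD_of_get?_eq_some _ 0 hbb
  have hab : a = b := by rw [← hda, h, hdb]
  subst hab
  exact hi f g a (by exact ha) (by exact hbb)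

-- B's counter: getD is the total number of word-set occurrences
theorem pvCnt_fold_getD (rs : List String) : ∀ (d : PySem.Dict String Int) (f : String),
    (rs.foldl (fun d r => (pvW r).foldl (fun d w => d.insert w (d.getD w 0 + 1)) d) d).getD f 0 =
      d.getD f 0 + pvSum rs f := by
  induction rs with
  | nil => intro d f; simp [pvSum]
  | cons r rs ih =>
    intro d f
    rw [List.foldl_cons, ih]
    rw [PySem.Dict.getD_foldl_insert_add_one]
    simp [pvSum, add_assoc]

theorem pvCnt_getD (responses : List String) (f : String) :
    (pvCnt responses).getD f 0 = pvSum responses f := by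
  unfold pvCnt
  rw [pvCnt_fold_getD]
  simp [PySem.Dict.getD_empty]

-- A's guarded counting loop: keys never change
theorem pvInnerA_keys (l : List String) : ∀ (d : PySem.Dict String Int),
    (l.foldl (fun d c => if d.contains c then d.insert c (d.getD c 0 + 1) else d) d).keys = d.keys := by
  induction l with
  | nil => intro d; rfl
  | cons c l ih =>
    intro d
    rw [List.foldl_cons]
    by_cases hc : d.contains c = true
    · rw [if_pos hc, ih, PySem.Dict.keys_insert_of_contains d _ hc]
    · rw [if_neg hc, ih]

theorem pvHmp_keys (features responses : List String) :
    (pvHmp features responses).keys = PySem.Set.ofList features := by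
  unfold pvHmp
  have : ∀ (rs : List String) (d : PySem.Dict String Int),
      (rs.foldl (fun d r =>
        (pvW r).foldl (fun d c => if d.contains c then d.insert c (d.getD c 0 + 1) else d) d) d).keys = d.keys := by
    intro rs
    induction rs with
    | nil => intro d; rfl
    | cons r rs ih => intro d; rw [List.foldl_cons, ih, pvInnerA_keys]
  rw [this]
  unfold pvHmp0
  rw [PySem.Dict.keys_foldl_insert (PySem.Set.ofList features) (fun _ _ => (0:Int)) PySem.Dict.empty]
  show PySem.Set.update PySem.Set.empty (PySem.Set.ofList features) = _
  rw [show (PySem.Set.update PySem.Set.empty (PySem.Set.ofList features) : List String) = PySem.Set.ofList (PySem.Set.ofList features) from rfl]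
  exact PySem.Set.ofList_eq_self_of_nodup _ (PySem.Set.nodup_ofList features)

theorem pvHmp0_getD (features : List String) (f : String) :
    (pvHmp0 features).getD f 0 = 0 := by
  unfold pvHmp0
  have hitems := PySem.Dict.items_foldl_insert_fresh (PySem.Set.ofList features)
    (fun a => a) (fun _ => (0:Int)) PySem.Dict.empty
    (by intro a _; simp [PySem.Dict.contains_empty])
    (by simpa using PySem.Set.nodup_ofList features)
  by_cases hf : f ∈ PySem.Set.ofList features
  · refine PySem.Dict.getD_of_mem_items _ ?_ ?_ 0
    · rw [hitems]
      exact List.mem_append_right _ (List.mem_map.mpr ⟨f, hf, rfl⟩)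
    · exact PySem.Dict.nodup_keys_foldl_insert _ _ _ (by simp [PySem.Dict.keys_empty])
  · refine PySem.Dict.getD_of_not_contains _ 0 ?_
    rw [PySem.Dict.contains_eq_decide_mem_keys]
    have : ((PySem.Set.ofList features).foldl
        (fun d f => d.insert f (0:Int)) PySem.Dict.empty).keys = PySem.Set.ofList features := by
      rw [PySem.Dict.keys_foldl_insert]
      show PySem.Set.update PySem.Set.empty (PySem.Set.ofList features) = _
      rw [show (PySem.Set.update PySem.Set.empty (PySem.Set.ofList features) : List String) = PySem.Set.ofList (PySem.Set.ofList features) from rfl]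
      exact PySem.Set.ofList_eq_self_of_nodup _ (PySem.Set.nodup_ofList features)
    rw [this]; simpa using hf

-- A's guarded counting loop: getD adds the count of members
theorem pvInnerA_getD (l : List String) : ∀ (d : PySem.Dict String Int) (f : String),
    (l.foldl (fun d c => if d.contains c then d.insert c (d.getD c 0 + 1) else d) d).getD f 0 =
      d.getD f 0 + (if d.contains f then (l.count f : Int) else 0) := by
  induction l with
  | nil => intro d f; simp
  | cons c l ih =>
    intro d f
    rw [List.foldl_cons]
    by_cases hc : d.contains c = true
    · rw [if_pos hc, ih, PySem.Dict.getD_insert, PySem.Dict.contains_insert]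
      by_cases hfc : f = c
      · subst hfc
        simp [hc]
        ring
      · have hbeq : (f == c) = false := by simp [hfc]
        rw [if_neg hfc, hbeq, Bool.false_or]
        by_cases hf : d.contains f = true
        · simp [hf, Ne.symm hfc]
        · simp [hf]
    · rw [if_neg hc, ih]
      by_cases hf : d.contains f = true
      · rw [if_pos hf, if_pos hf, List.count_cons]
        have hfc : f ≠ c := by rintro rfl; exact hc hf
        simp [Ne.symm hfc]
      · simp [hf]

theorem pvHmp_fold_getD (rs : List String) : ∀ (d : PySem.Dict String Int) (f : String),
    (rs.foldl (fun d r =>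
      (pvW r).foldl (fun d c => if d.contains c then d.insert c (d.getD c 0 + 1) else d) d) d).getD f 0 =
      d.getD f 0 + (if d.contains f then pvSum rs f else 0) := by
  induction rs with
  | nil => intro d f; simp [pvSum]
  | cons r rs ih =>
    intro d f
    rw [List.foldl_cons, ih]
    have hkeys : ((pvW r).foldl
        (fun d c => if d.contains c then d.insert c (d.getD c 0 + 1) else d) d).keys = d.keys :=
      pvInnerA_keys _ d
    have hcont : ((pvW r).foldl
        (fun d c => if d.contains c then d.insert c (d.getD c 0 + 1) else d) d).contains f = d.contains f := by
      rw [PySem.Dict.contains_eq_decide_mem_keys, PySem.Dict.contains_eq_decide_mem_keys, hkeys]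
    rw [hcont, pvInnerA_getD]
    by_cases hf : d.contains f = true
    · rw [if_pos hf, if_pos hf, if_pos hf]
      simp [pvSum, add_assoc]
    · simp [hf]

theorem pvHmp_getD (features responses : List String) (f : String)
    (hf : f ∈ PySem.Set.ofList features) :
    (pvHmp features responses).getD f 0 = pvSum responses f := by
  unfold pvHmp
  rw [pvHmp_fold_getD, pvHmp0_getD]
  rw [if_pos]
  · ring
  · rw [PySem.Dict.contains_eq_decide_mem_keys]
    have : (pvHmp0 features).keys = PySem.Set.ofList features := by
      unfold pvHmp0
      rw [PySem.Dict.keys_foldl_insert]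
      show PySem.Set.update PySem.Set.empty (PySem.Set.ofList features) = _
      rw [show (PySem.Set.update PySem.Set.empty (PySem.Set.ofList features) : List String) = PySem.Set.ofList (PySem.Set.ofList features) from rfl]
      exact PySem.Set.ofList_eq_self_of_nodup _ (PySem.Set.nodup_ofList features)
    rw [this]; simpa using hf

theorem pvHmp_nodup_keys (features responses : List String) :
    (pvHmp features responses).keys.Nodup := by
  rw [pvHmp_keys]; exact PySem.Set.nodup_ofList features

theorem pvHmp_items (features responses : List String) :
    (pvHmp features responses).items =
      (PySem.Set.ofList features).map (fun f => (f, (pvHmp features responses).getD f 0)) := by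
  rw [PySem.Dict.items_eq_map_keys _ (pvHmp_nodup_keys features responses) 0, pvHmp_keys]

-- the bucket-building step is a plain modify
theorem pvHmpCnt_step (d : PySem.Dict Int (List String)) (p : String × Int) :
    (if d.contains p.2 then d else d.insert p.2 []).modify p.2 [] (fun l => l ++ [p.1]) =
      d.modify p.2 [] (fun l => l ++ [p.1]) := by
  by_cases hc : d.contains p.2 = true
  · rw [if_pos hc]
  · rw [if_neg hc]
    simp only [PySem.Dict.modify]
    rw [PySem.Dict.getD_insert_self, PySem.Dict.insert_insert_self,
        PySem.Dict.getD_of_not_contains d [] (by simpa using hc)]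

theorem pvHmpCnt_eq (features responses : List String) :
    pvHmpCnt features responses =
      (pvHmp features responses).items.foldl
        (fun d p => d.modify p.2 [] (fun l => l ++ [p.1])) PySem.Dict.empty := by
  unfold pvHmpCnt
  congr 1
  funext d p
  exact pvHmpCnt_step d p

theorem pvHmpCnt_getD (features responses : List String) (c : Int) :
    (pvHmpCnt features responses).getD c [] =
      (PySem.Set.ofList features).filter (fun f => (pvHmp features responses).getD f 0 == c) := by
  rw [pvHmpCnt_eq]
  have hswap : (pvHmp features responses).items.foldl
      (fun d p => d.modify p.2 [] (fun l => l ++ [p.1])) PySem.Dict.empty =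
      ((pvHmp features responses).items.map Prod.swap).foldl
      (fun d q => d.modify q.1 [] (fun l => l ++ [q.2])) PySem.Dict.empty := by
    rw [List.foldl_map]; rfl
  rw [hswap, PySem.Dict.getD_foldl_modify_append]

  rw [pvHmp_items]
  simp [List.map_map, List.filter_map, Function.comp_def]

theorem pvHmpCnt_keys (features responses : List String) :
    (pvHmpCnt features responses).keys =
      PySem.Set.ofList ((PySem.Set.ofList features).map
        (fun f => (pvHmp features responses).getD f 0)) := by
  rw [pvHmpCnt_eq]
  have hswap : (pvHmp features responses).items.foldl
      (fun d p => d.modify p.2 [] (fun l => l ++ [p.1])) PySem.Dict.empty =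
      ((pvHmp features responses).items.map Prod.swap).foldl
      (fun d q => d.modify q.1 [] (fun l => l ++ [q.2])) PySem.Dict.empty := by
    rw [List.foldl_map]; rfl
  rw [hswap]
  rw [PySem.Dict.keys_foldl_modify_key ((pvHmp features responses).items.map Prod.swap)
    (fun q => q.1) [] (fun _ q => (fun l => l ++ [q.2])) PySem.Dict.empty]
  rw [pvHmp_items]
  show PySem.Set.ofList _ = _
  simp [List.map_map, Function.comp_def]

-- a two-key stable sort is a lexicographic one-key sort
theorem pvSorted2_eq_sorted_toLex {α : Type} (xs : List α) (k1 k2 : α → Int) :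
    PySem.List.sorted2 xs k1 k2 =
      PySem.List.sorted xs (fun x => (toLex (k1 x, k2 x) : Int ×ₗ Int)) := by
  simp only [PySem.List.sorted2, PySem.List.sorted, if_neg (by simp : ¬(false = true))]
  congr 1
  funext acc x
  congr 1
  funext a b
  rcases lt_trichotomy (k1 a) (k1 b) with h | h | h
  · simp [h, Prod.Lex.toLex_lt_toLex]
  · simp [h, Prod.Lex.toLex_lt_toLex]
  · simp [h, not_lt_of_gt h, Prod.Lex.toLex_lt_toLex, ne_of_gt h]

-- permutation congruence for flatMap
theorem pvFlatMap_perm {α β : Type} (vs : List α) (G H : α → List β)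
    (h : ∀ c ∈ vs, (G c).Perm (H c)) : (vs.flatMap G).Perm (vs.flatMap H) := by
  induction vs with
  | nil => simp
  | cons c vs ih =>
    simp only [List.flatMap_cons]
    exact (h c (by simp)).append (ih (fun c hc => h c (by simp [hc])))

-- concatenating the fibres over all distinct key values is a permutation of the list
theorem pvPartition_perm {α : Type} [DecidableEq α] (vs : List Int) :
    ∀ (l : List α) (key : α → Int), vs.Nodup → (∀ x ∈ l, key x ∈ vs) →
    (vs.flatMap (fun c => l.filter (fun x => key x == c))).Perm l := by
  induction vs with
  | nil =>
    intro l key _ hcov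
    cases l with
    | nil => simp
    | cons x l => exact absurd (hcov x (by simp)) (by simp)
  | cons c vs ih =>
    intro l key hnd hcov
    rw [List.flatMap_cons]
    have hvs : c ∉ vs := (List.nodup_cons.mp hnd).1
    have hstep : vs.flatMap (fun c' => l.filter (fun x => key x == c')) =
        vs.flatMap (fun c' => (l.filter (fun x => !(key x == c))).filter (fun x => key x == c')) := by
      apply List.flatMap_congr
      intro c' hc'
      rw [List.filter_filter]
      apply List.filter_congr
      intro x _
      have hcc : c' ≠ c := fun hh => hvs (hh ▸ hc')
      by_cases h : key x = c'
      · have hxc : key x ≠ c := by rw [h]; exact hcc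
        simp [h, hcc]
      · simp [h]
    rw [hstep]
    have hperm := ih (l.filter (fun x => !(key x == c))) key (List.nodup_cons.mp hnd).2
      (by
        intro x hx
        obtain ⟨hxl, hxc⟩ := List.mem_filter.mp hx
        have := hcov x hxl
        simp only [List.mem_cons] at this
        rcases this with h | h
        · simp [h] at hxc
        · exact h)
    exact (hperm.append_left (l.filter (fun x => key x == c))).trans
      (List.filter_append_perm (fun x => key x == c) l)

theorem sortFeatures_spec_core (features responses : List String) :
    sortFeatures features responses = sortFeatures_alt features responses := by
  rw [sortFeatures_eq_helpers, sortFeatures_alt_eq_helpers]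
  rw [PySem.List.foldl_append_eq_flatMap, List.nil_append]
  rw [pvOrd_keys, pvSorted2_eq_sorted_toLex]
  -- abbreviations
  set S := PySem.Set.ofList features with hS
  set CA : String → Int := fun f => (pvHmp features responses).getD f 0 with hCA
  set ordv : String → Int := fun f => (pvOrd features).getD f 0 with hordv
  set keyB : String → Int ×ₗ Int :=
    fun f => toLex (-((pvCnt responses).getD f 0), ordv f) with hkeyB
  set CV := PySem.Set.ofList (S.map CA) with hCV
  set G : Int → List String :=
    fun c => PySem.List.sorted ((pvHmpCnt features responses).getD c []) ordv with hG
  have hGc : ∀ c, (pvHmpCnt features responses).getD c [] = S.filter (fun f => CA f == c) :=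
    fun c => pvHmpCnt_getD features responses c
  have hkeysCV : (pvHmpCnt features responses).keys = CV := pvHmpCnt_keys features responses
  rw [hkeysCV]
  -- key agreement on S
  have hkey_cnt : ∀ f ∈ S, (pvCnt responses).getD f 0 = CA f := by
    intro f hf
    rw [pvCnt_getD, hCA]
    exact (pvHmp_getD features responses f hf).symm
  have hSnodup : S.Nodup := PySem.Set.nodup_ofList features
  -- membership in a block
  have hmemG : ∀ c x, x ∈ G c → x ∈ S ∧ CA x = c := by
    intro c x hx
    simp only [hG, PySem.List.mem_sorted, hGc] at hx
    obtain ⟨h1, h2⟩ := List.mem_filter.mp hx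
    exact ⟨h1, by simpa using h2⟩
  -- the concatenation is a permutation of S
  have hperm : ((PySem.List.sorted CV (fun k => k) true).flatMap G).Perm S := by
    have h1 : ((PySem.List.sorted CV (fun k => k) true).flatMap G).Perm
        ((PySem.List.sorted CV (fun k => k) true).flatMap (fun c => S.filter (fun f => CA f == c))) := by
      apply pvFlatMap_perm
      intro c _
      simp only [hG, hGc]
      exact PySem.List.sorted_perm _ _ _
    have h2 : ((PySem.List.sorted CV (fun k => k) true).flatMap
        (fun c => S.filter (fun f => CA f == c))).Perm
        (CV.flatMap (fun c => S.filter (fun f => CA f == c))) :=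
      List.Perm.flatMap_right _ (PySem.List.sorted_perm CV (fun k => k) true)
    have h3 : (CV.flatMap (fun c => S.filter (fun f => CA f == c))).Perm S := by
      apply pvPartition_perm
      · exact PySem.Set.nodup_ofList _
      · intro x hx
        rw [hCV, PySem.Set.mem_ofList]
        exact List.mem_map.mpr ⟨x, hx, rfl⟩
    exact (h1.trans h2).trans h3
  -- ordv is injective on S
  have hordinj : ∀ {a b : String}, a ∈ S → b ∈ S → a ≠ b → ordv a ≠ ordv b := by
    intro a b ha hb hne h
    exact hne (pvOrd_getD_inj features (by rw [pvOrd_keys]; exact ha)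
      (by rw [pvOrd_keys]; exact hb) h)
  -- the concatenation is strictly increasing in keyB
  have hpair : ((PySem.List.sorted CV (fun k => k) true).flatMap G).Pairwise
      (fun a b => keyB a < keyB b) := by
    rw [List.pairwise_flatMap]
    constructor
    · -- within one block
      intro c _
      have hsorted : (G c).Pairwise (fun a b => ordv a ≤ ordv b) := by
        rw [hG]; exact PySem.List.sorted_pairwise _ _
      have hnd : (G c).Nodup := by
        simp only [hG, hGc]
        exact ((PySem.List.sorted_perm _ _ _).nodup_iff).mpr (hSnodup.filter _)
      have := hsorted.and hnd
      refine List.Pairwise.imp_of_mem ?_ this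
      intro a b ha hb hab
      obtain ⟨hle, hne⟩ := hab
      obtain ⟨haS, haC⟩ := hmemG c a ha
      obtain ⟨hbS, hbC⟩ := hmemG c b hb
      rw [hkeyB]
      rw [Prod.Lex.toLex_lt_toLex]
      right
      constructor
      · simp only [hkey_cnt a haS, hkey_cnt b hbS, haC, hbC]
      · exact lt_of_le_of_ne hle (hordinj haS hbS hne)
    · -- across blocks: count values strictly decrease
      have hdesc : (PySem.List.sorted CV (fun k => k) true).Pairwise (fun a b => b < a) := by
        have h1 : (PySem.List.sorted CV (fun k => k) true).Pairwise (fun a b => b ≤ a) :=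
          PySem.List.sorted_pairwise_rev CV (fun k => k)
        have h2 : (PySem.List.sorted CV (fun k => k) true).Nodup :=
          ((PySem.List.sorted_perm _ _ _).nodup_iff).mpr (PySem.Set.nodup_ofList _)
        refine List.Pairwise.imp ?_ (h1.and h2)
        rintro a b ⟨hle, hne⟩
        exact lt_of_le_of_ne hle (Ne.symm hne)
      refine List.Pairwise.imp ?_ hdesc
      intro c1 c2 hlt x hx y hy
      obtain ⟨hxS, hxC⟩ := hmemG c1 x hx
      obtain ⟨hyS, hyC⟩ := hmemG c2 y hy
      rw [hkeyB, Prod.Lex.toLex_lt_toLex]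
      left
      simp only [hkey_cnt x hxS, hkey_cnt y hyS, hxC, hyC]
      omega
  exact (PySem.List.sorted_eq_of_perm_of_pairwise_lt S _ keyB hperm hpair).symm

-- ===== VERDICT (by name: the statement is the Claim_ definition above) =====
theorem sortFeatures_spec : Claim_equal_sortFeatures := by
  intro features responses _
  unfold Spec_sortFeatures
  exact sortFeatures_spec_core features responses
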